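-- pv_equiv track=rewrite | github.com/deepanshs/mrsimulator | src/mrsimulator/method.py | get_iso_dict
-- ===== SOURCE A (Python) =====
-- def get_iso_dict(channel, isotope):
--     """
--         Parse the isotopomer sites to determine indices of each isotope that
--         is part of the method channel.
--
--         Args:
--             channel: List object
--             isotope: List object
--
--     """
--     iso_dict = {}
--
--     # determine channels for P
--     for i, item in enumerate(isotope):
--         if item in channel and item not in iso_dict:
--             iso_dict[item] = [i]
--         elif item in iso_dict:
--             iso_dict[item].append(i)
--
--     return iso_dict
-- ===== SOURCE B (Python) =====
-- def get_iso_dict(channel, isotope):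
--     # Per-key gather: list channel members in first-occurrence order, then
--     # collect each key's indices by a dedicated scan of isotope.
--     chan = set(channel)
--     keys = []
--     for item in isotope:
--         if item in chan and item not in keys:
--             keys.append(item)
--     return {k: [i for i, item in enumerate(isotope) if item == k] for k in keys}
-- ===== Notes on version B (the rewrite author's own statement) =====
-- stated objective: alternative
-- what changed: Replaces A's single-pass dict building (grow/append inside one loop over enumerate, with a linear 'item in channel' list scan per element) by a per-key gather: first list the channel members in first-occurrence order using a set for the channel test, then collect each key's index list with its own scan of isotope.
import Mathlib
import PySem

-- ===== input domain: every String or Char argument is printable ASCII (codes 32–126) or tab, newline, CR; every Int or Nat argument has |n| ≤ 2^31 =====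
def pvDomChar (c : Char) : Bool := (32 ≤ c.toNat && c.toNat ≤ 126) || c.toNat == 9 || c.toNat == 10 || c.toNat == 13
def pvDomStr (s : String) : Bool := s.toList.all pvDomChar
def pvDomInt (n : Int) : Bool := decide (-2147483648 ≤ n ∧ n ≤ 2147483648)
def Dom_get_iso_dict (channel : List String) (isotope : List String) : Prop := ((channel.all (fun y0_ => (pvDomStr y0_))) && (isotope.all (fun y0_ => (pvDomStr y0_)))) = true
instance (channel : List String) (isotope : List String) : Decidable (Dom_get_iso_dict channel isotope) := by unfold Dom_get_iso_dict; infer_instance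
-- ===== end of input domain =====

-- B gathers the channel keys first and then collects each key's indices by its own scan (per-key gather instead of A's single-pass dict building); return-value equivalent to A.

-- ===== PORT A =====
def get_iso_dict (channel : List String) (isotope : List String) : List (String × List Int) :=
  ((PySem.List.enumerate isotope).foldl
    (fun (d : PySem.Dict String (List Int)) (q : Int × String) =>
      if channel.contains q.2 && !(d.contains q.2) then d.insert q.2 [q.1]
      else if d.contains q.2 then d.modify q.2 [] (fun lst => lst ++ [q.1])
      else d)
    PySem.Dict.empty).items

-- ===== PORT B =====
def get_iso_dict_alt (channel : List String) (isotope : List String) : List (String × List Int) :=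
  let chan : PySem.Set String := PySem.Set.ofList channel
  let keys : List String := isotope.foldl
    (fun (ks : List String) item =>
      if PySem.Set.contains chan item && !(ks.contains item) then ks ++ [item] else ks) []
  keys.map (fun k =>
    (k, (PySem.List.enumerate isotope).foldl
          (fun (acc : List Int) (q : Int × String) =>
            if q.2 == k then acc ++ [q.1] else acc) []))

-- ===== PRECONDITION & SPEC =====
def Spec_get_iso_dict (channel : List String) (isotope : List String) (out : List (String × List Int)) : Prop := out = get_iso_dict_alt channel isotope
instance (channel : List String) (isotope : List String) (out : List (String × List Int)) : Decidable (Spec_get_iso_dict channel isotope out) := by unfold Spec_get_iso_dict; infer_instance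

-- ===== CLAIM (what is proved, stated in full; the proofs are below) =====
def Claim_equal_get_iso_dict : Prop := ∀ (channel : List String) (isotope : List String), Dom_get_iso_dict channel isotope → Spec_get_iso_dict channel isotope (get_iso_dict channel isotope)

-- ===== LEMMAS AND PROOFS =====

-- proof-only helpers: the key list accumulated over enumerate pairs, and the index list of one key
def pvKeys (channel : List String) (l : List (Int × String)) (s : List String) : List String :=
  l.foldl (fun ks q => if channel.contains q.2 && !(ks.contains q.2) then ks ++ [q.2] else ks) s

def pvIdx (k : String) (l : List (Int × String)) : List Int :=
  (l.filter (fun q => q.2 == k)).map (·.1)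

lemma mem_pvKeys (channel : List String) (l : List (Int × String)) :
    ∀ (s : List String) (a : String),
      a ∈ pvKeys channel l s ↔ a ∈ s ∨ (a ∈ channel ∧ a ∈ l.map (·.2)) := by
  induction l with
  | nil => simp [pvKeys]
  | cons q t ih =>
    intro s a
    have step : pvKeys channel (q :: t) s =
        pvKeys channel t (if channel.contains q.2 && !(s.contains q.2) then s ++ [q.2] else s) :=
      rfl
    rw [step, ih]
    by_cases hc : channel.contains q.2 = true <;> by_cases hs : s.contains q.2 = true <;>
      simp only [hc, hs, Bool.not_true, Bool.not_false, Bool.and_true, Bool.and_false,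
        if_true, if_false, Bool.false_eq_true, List.mem_append,
        List.map_cons, List.mem_cons, List.not_mem_nil, or_false]
    · have hs' : q.2 ∈ s := by simpa using hs
      constructor
      · rintro (h | ⟨h1, h2⟩)
        · exact Or.inl h
        · exact Or.inr ⟨h1, Or.inr h2⟩
      · rintro (h | ⟨h1, h2 | h2⟩)
        · exact Or.inl h
        · exact Or.inl (h2 ▸ hs')
        · exact Or.inr ⟨h1, h2⟩
    · have hc' : q.2 ∈ channel := by simpa using hc
      constructor
      · rintro ((h | h) | ⟨h1, h2⟩)
        · exact Or.inl h
        · exact Or.inr ⟨h ▸ hc', Or.inl h⟩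
        · exact Or.inr ⟨h1, Or.inr h2⟩
      · rintro (h | ⟨h1, h2 | h2⟩)
        · exact Or.inl (Or.inl h)
        · exact Or.inl (Or.inr h2)
        · exact Or.inr ⟨h1, h2⟩
    all_goals
      have hc' : q.2 ∉ channel := by simpa using hc
      constructor
      · rintro (h | ⟨h1, h2⟩)
        · exact Or.inl h
        · exact Or.inr ⟨h1, Or.inr h2⟩
      · rintro (h | ⟨h1, h2 | h2⟩)
        · exact Or.inl h
        · exact absurd (h2 ▸ h1) hc'
        · exact Or.inr ⟨h1, h2⟩

lemma pvIdx_append (k : String) (t : List (Int × String)) (p : Int × String) :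
    pvIdx k (t ++ [p]) = pvIdx k t ++ (if p.2 == k then [p.1] else []) := by
  by_cases h : p.2 = k <;> simp [pvIdx, List.filter_append, h]

lemma contains_mapkeys (ks : List String) (f : String → List Int) (k : String) :
    (PySem.Dict.mk (ks.map (fun v => (v, f v)))).contains k = ks.contains k := by
  induction ks with
  | nil => rfl
  | cons v t ih =>
    by_cases h : v = k
    · subst h; simp [PySem.Dict.contains, List.any_cons]
    · have h2 : (v == k) = false := by simpa using h
      have h3 : (decide (k = v)) = false := by
        simp only [decide_eq_false_iff_not]
        exact fun hh => h hh.symm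
      simp_all [PySem.Dict.contains, List.any_cons]

lemma getD_mapkeys (ks : List String) (f : String → List Int) (k : String) (hk : k ∈ ks) :
    (PySem.Dict.mk (ks.map (fun v => (v, f v)))).getD k [] = f k := by
  induction ks with
  | nil => cases hk
  | cons v t ih =>
    by_cases h : v = k
    · subst h; simp [PySem.Dict.getD, PySem.Dict.get?]
    · rcases List.mem_cons.mp hk with h' | h'
      · exact absurd h'.symm h
      · have h2 : (v == k) = false := by simpa using h
        simpa [PySem.Dict.getD, PySem.Dict.get?, h2] using ih h'

lemma main_lemma (channel : List String) (l : List (Int × String)) :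
    (l.foldl
      (fun (d : PySem.Dict String (List Int)) (q : Int × String) =>
        if channel.contains q.2 && !(d.contains q.2) then d.insert q.2 [q.1]
        else if d.contains q.2 then d.modify q.2 [] (fun lst => lst ++ [q.1])
        else d)
      PySem.Dict.empty).items
    = (pvKeys channel l []).map (fun v => (v, pvIdx v l)) := by
  induction l using List.reverseRecOn with
  | nil => rfl
  | append_singleton t p ih =>
    rw [List.foldl_append, List.foldl_cons, List.foldl_nil]
    have hKeys : pvKeys channel (t ++ [p]) [] =
        if channel.contains p.2 && !((pvKeys channel t []).contains p.2)
        then pvKeys channel t [] ++ [p.2] else pvKeys channel t [] := by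
      simp [pvKeys, List.foldl_append]
    set K := pvKeys channel t [] with hK
    have hD : (t.foldl
        (fun (d : PySem.Dict String (List Int)) (q : Int × String) =>
          if channel.contains q.2 && !(d.contains q.2) then d.insert q.2 [q.1]
          else if d.contains q.2 then d.modify q.2 [] (fun lst => lst ++ [q.1])
          else d)
        PySem.Dict.empty) = PySem.Dict.mk (K.map (fun v => (v, pvIdx v t))) :=
      PySem.Dict.ext ih
    rw [hD]
    have hcont := contains_mapkeys K (fun v => pvIdx v t) p.2
    by_cases hKc : p.2 ∈ K
    · -- key already present: modify appends the index in place
      have hKcb : K.contains p.2 = true := by simpa using hKc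
      have hcb : (PySem.Dict.mk (K.map (fun v => (v, pvIdx v t)))).contains p.2 = true := by
        rw [hcont]; exact hKcb
      rw [hKeys]
      simp only [hKcb, Bool.not_true, Bool.and_false, Bool.false_eq_true, if_false, hcb, if_true]
      rw [PySem.Dict.modify]
      rw [getD_mapkeys K (fun v => pvIdx v t) p.2 hKc,
          PySem.Dict.items_insert_of_contains _ _ hcb]
      show (K.map (fun v => (v, pvIdx v t))).map _ = _
      rw [List.map_map]
      apply List.map_congr_left
      intro v _
      by_cases h : v = p.2
      · subst h; simp [pvIdx_append]
      · have hb : (v == p.2) = false := by simpa using h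
        have hb2 : (p.2 == v) = false := by
          simp only [beq_eq_false_iff_ne, ne_eq]
          exact fun hh => h hh.symm
        simp [Function.comp, hb, hb2, pvIdx_append]
    · have hKcb : K.contains p.2 = false := by simpa using hKc
      have hcb : (PySem.Dict.mk (K.map (fun v => (v, pvIdx v t)))).contains p.2 = false := by
        rw [hcont]; exact hKcb
      by_cases hch : p.2 ∈ channel
      · -- new channel key: insert appends (p.2, [p.1])
        have hchb : channel.contains p.2 = true := by simpa using hch
        have hidx : pvIdx p.2 t = [] := by
          have hnot : p.2 ∉ t.map (·.2) := by
            intro hmem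
            exact hKc ((mem_pvKeys channel t [] p.2).2 (Or.inr ⟨hch, hmem⟩))
          unfold pvIdx
          rw [List.filter_eq_nil_iff.mpr, List.map_nil]
          intro q hq hbe
          refine hnot ?_
          have hqe : q.2 = p.2 := by simpa using hbe
          exact hqe ▸ List.mem_map_of_mem hq
        rw [hKeys]
        simp only [hchb, hKcb, hcb, Bool.not_false, Bool.and_self, if_true]
        rw [PySem.Dict.items_insert_of_not_contains _ _ hcb]
        rw [List.map_append]
        congr 1
        · apply List.map_congr_left
          intro v hv
          have hne : p.2 ≠ v := fun h => hKc (h ▸ hv)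
          simp [pvIdx_append, hne]
        · simp [pvIdx_append, hidx]
      · -- not a channel key and not present: no-op
        have hchb : channel.contains p.2 = false := by simpa using hch
        rw [hKeys]
        simp only [hchb, hKcb, hcb, Bool.false_and, Bool.false_eq_true, if_false]
        apply List.map_congr_left
        intro v hv
        have hvch : v ∈ channel := ((mem_pvKeys channel t [] v).1 hv).elim (by simp) And.left
        have hne : p.2 ≠ v := fun h => hch (h ▸ hvch)
        simp [pvIdx_append, hne]

lemma keys_over_enumerate (channel : List String) (isotope : List String) :
    ∀ (n : Int) (s : List String),
      isotope.foldl
        (fun (ks : List String) item =>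
          if PySem.Set.contains (PySem.Set.ofList channel) item && !(ks.contains item)
          then ks ++ [item] else ks) s
      = pvKeys channel (PySem.List.enumerate isotope n) s := by
  induction isotope with
  | nil => intro n s; rfl
  | cons x t ih =>
    intro n s
    rw [PySem.List.enumerate_cons]
    simp only [pvKeys, List.foldl_cons]
    have hset : PySem.Set.contains (PySem.Set.ofList channel) x = channel.contains x := by
      simp [PySem.Set.contains, PySem.Set.mem_ofList]
    rw [hset]
    exact ih (n+1) _

lemma inner_foldl (k : String) (l : List (Int × String)) :
    l.foldl (fun (acc : List Int) (q : Int × String) =>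
      if q.2 == k then acc ++ [q.1] else acc) [] = pvIdx k l := by
  simpa [pvIdx] using
    PySem.List.foldl_append_if (l := l) (acc := []) (p := fun q : Int × String => q.2 == k)
      (f := (·.1))

-- ===== VERDICT (by name: the statement is the Claim_ definition above) =====
theorem get_iso_dict_spec : Claim_equal_get_iso_dict := by
  intro channel isotope _
  unfold Spec_get_iso_dict get_iso_dict get_iso_dict_alt
  rw [main_lemma]
  simp only []
  rw [keys_over_enumerate channel isotope 0]
  apply List.map_congr_left
  intro v _
  rw [inner_foldl]
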